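-- pv_equiv track=rewrite | github.com/DanielSeanBrown/coding-challenges | edabit/advanced-list-sort.py | advanced_sort
-- ===== SOURCE A (Python) =====
-- def advanced_sort(sequence):
--
--     '''given a list of items, groups equivalent items in maintaining order of appearence
--     and returns a list of sublist clusters'''
--
--     clustered_sequence = []
--
--   # create clusters of matching items, maintaining order of precedence
--     for item in sequence:
--         if item not in clustered_sequence:
--             clustered_sequence.append(item)
--         else:
--             clustered_sequence.insert(clustered_sequence.index(item), item)
--
--     clustered_sequence.append('dummy')
--     incumbent_item = clustered_sequence[0]
--     count = 0
--     sorted_sequence = []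
--
--   # organise into sublists
--     for item in clustered_sequence:
--         if incumbent_item == item:
--             count += 1
--         else:
--             sorted_sequence.append([incumbent_item for _ in range(count)])
--             count = 1
--             incumbent_item = item
--
--     return sorted_sequence
-- ===== SOURCE B (Python) =====
-- def advanced_sort(sequence):
--     '''given a list of items, groups equivalent items in maintaining order of appearence
--     and returns a list of sublist clusters'''
--     counts = {}
--     for item in sequence:
--         counts[item] = counts.get(item, 0) + 1
--     return [[item] * count for item, count in counts.items()]
-- ===== Notes on version B (the rewrite author's own statement) =====
-- stated objective: faster
-- what changed: A clusters by repeated membership tests, list.index scans and mid-list inserts and then run-length-encodes past a 'dummy' sentinel; B makes one pass building a dict counter (insertion order = first appearance) and emits [item]*count per key.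
import Mathlib
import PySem

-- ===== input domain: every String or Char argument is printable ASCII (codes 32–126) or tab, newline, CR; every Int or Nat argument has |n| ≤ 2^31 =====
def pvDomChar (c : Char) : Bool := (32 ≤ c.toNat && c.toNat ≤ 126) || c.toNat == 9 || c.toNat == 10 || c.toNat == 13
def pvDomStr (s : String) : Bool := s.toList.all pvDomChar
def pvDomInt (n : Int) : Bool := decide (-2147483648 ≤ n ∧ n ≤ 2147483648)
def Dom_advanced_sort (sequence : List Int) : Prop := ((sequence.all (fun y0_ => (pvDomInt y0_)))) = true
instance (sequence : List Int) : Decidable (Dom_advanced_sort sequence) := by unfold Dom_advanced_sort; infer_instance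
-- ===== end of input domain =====

-- B replaces A's quadratic scan-and-insert clustering (plus sentinel run-length pass) by a single
-- dict-counter pass emitting [item]*count per first-appearance key: objective = faster (O(n^2) scans removed).


-- ===== PORT A =====
-- first loop: 'if item not in clustered: clustered.append(item) else: clustered.insert(clustered.index(item), item)'
def aClusterStep (cs : List Int) (item : Int) : List Int :=
  if item ∈ cs then
    PySem.List.insert cs (((PySem.List.index? cs item).getD 0 : Nat) : Int) item
  else cs ++ [item]

-- second loop's state is (incumbent, count, sorted_sequence); items are Option Int, with 'none'
-- modelling the string sentinel 'dummy' (which Python's '==' never equates to an int).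
-- '[incumbent for _ in range(count)]' is List.replicate count.toNat (inc.getD 0): count is never
-- negative, and the default 0 is never read (the sentinel becomes incumbent only at the last item, never flushed).
def aRLEStep (st : Option Int × Int × List (List Int)) (item : Option Int) : Option Int × Int × List (List Int) :=
  let (inc, count, sorted) := st
  if inc = item then (inc, count + 1, sorted)
  else (item, 1, sorted ++ [List.replicate count.toNat (inc.getD 0)])

def advanced_sort (sequence : List Int) : List (List Int) :=
  let clustered := sequence.foldl aClusterStep []
  let withDummy := clustered.map some ++ [(none : Option Int)]
  -- incumbent_item = clustered_sequence[0]: the list is nonempty ('dummy' was just appended)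
  let incumbent := PySem.List.pyGetD withDummy 0 none
  (withDummy.foldl aRLEStep (incumbent, 0, [])).2.2

-- ===== PORT B =====
def advanced_sort_alt (sequence : List Int) : List (List Int) :=
  let counts := sequence.foldl (fun d item => d.insert item (d.getD item 0 + 1)) (PySem.Dict.empty (κ := Int) (ν := Int))
  counts.items.map (fun p => PySem.List.pyRepeat [p.1] p.2)

-- ===== PRECONDITION & SPEC =====
def Spec_advanced_sort (sequence : List Int) (out : List (List Int)) : Prop := out = advanced_sort_alt sequence
instance (sequence : List Int) (out : List (List Int)) : Decidable (Spec_advanced_sort sequence out) := by unfold Spec_advanced_sort; infer_instance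

-- ===== CLAIM (what is proved, stated in full; the proofs are below) =====
def Claim_equal_advanced_sort : Prop := ∀ (sequence : List Int), Dom_advanced_sort sequence → Spec_advanced_sort sequence (advanced_sort sequence)

-- ===== LEMMAS AND PROOFS =====

-- the value both ports compute: per first-appearance-distinct value v, the run [v] * (count v)
def pvGroups (l : List Int) : List (List Int) :=
  (PySem.Set.ofList l).map (fun v => List.replicate (l.count v) v)

theorem mem_flatten_groups (l : List Int) (v : Int) : v ∈ (pvGroups l).flatten ↔ v ∈ l := by
  simp [pvGroups, List.mem_flatten, List.mem_replicate, PySem.Set.mem_ofList]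
  intro hv
  simp [List.count_eq_zero]
  exact hv

theorem cluster_fold (l : List Int) : l.foldl aClusterStep [] = (pvGroups l).flatten := by
  induction l using List.reverseRecOn with
  | nil => simp [pvGroups, PySem.Set.ofList]
  | append_singleton l x ih =>
    rw [List.foldl_append, List.foldl_cons, List.foldl_nil, ih]
    by_cases hx : x ∈ l
    · -- insert branch
      have hnd : (PySem.Set.ofList l).Nodup := PySem.Set.nodup_ofList l
      have hxof : x ∈ PySem.Set.ofList l := (PySem.Set.mem_ofList _ _).mpr hx
      obtain ⟨as, bs, hsplit⟩ := List.append_of_mem hxof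
      have hnd' : (as ++ x :: bs).Nodup := hsplit ▸ hnd
      have hxas : x ∉ as := fun h =>
        (List.disjoint_of_nodup_append hnd') h (List.mem_cons_self)
      have hxbs : x ∉ bs := ((List.nodup_cons).mp (List.nodup_append.mp hnd').2.1).1
      set c := l.count x with hc
      have hc1 : 1 ≤ c := by
        rw [hc]; exact (List.count_pos_iff).mpr hx
      set Fas := (as.map (fun v => List.replicate (l.count v) v)).flatten with hFas
      set Fbs := (bs.map (fun v => List.replicate (l.count v) v)).flatten with hFbs
      have hflat : (pvGroups l).flatten = Fas ++ (List.replicate c x ++ Fbs) := by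
        rw [pvGroups, hsplit]
        simp [hFas, hFbs]
        rw [hc]
      have hxFas : x ∉ Fas := by
        rw [hFas]
        simp only [List.mem_flatten, List.mem_map, not_exists, not_and]
        rintro g ⟨v, hv, rfl⟩ hmem
        have hne : v ≠ x := fun h => hxas (h ▸ hv)
        exact hne (List.eq_of_mem_replicate hmem).symm
      have hrep : List.replicate c x = x :: List.replicate (c - 1) x := by
        conv_lhs => rw [show c = (c - 1) + 1 from by omega]
        rw [List.replicate_succ]
      have hcs : (pvGroups l).flatten = Fas ++ x :: (List.replicate (c - 1) x ++ Fbs) := by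
        rw [hflat, hrep]
        simp
      have hidx : PySem.List.index? ((pvGroups l).flatten) x = some Fas.length := by
        rw [PySem.List.index?_eq_some_iff]
        exact ⟨Fas, _, hcs, rfl, hxFas⟩
      rw [aClusterStep, if_pos (by rw [mem_flatten_groups]; exact hx), hidx]
      simp only [Option.getD_some]
      rw [PySem.List.insert_natCast _ _ _ (by rw [hcs]; simp)]
      rw [hcs, List.take_left, List.drop_left]
      -- LHS is now Fas ++ x :: x :: replicate (c-1) x ++ Fbs
      have hof2 : PySem.Set.ofList (l ++ [x]) = PySem.Set.ofList l := by
        rw [PySem.Set.ofList_eq_foldl, List.foldl_append, List.foldl_cons, List.foldl_nil,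
          ← PySem.Set.ofList_eq_foldl]
        exact PySem.Set.add_of_mem hxof
      conv_rhs => rw [pvGroups, hof2, hsplit]
      simp only [List.map_append, List.map_cons, List.flatten_append, List.flatten_cons]
      have has : as.map (fun v => List.replicate ((l ++ [x]).count v) v) = as.map (fun v => List.replicate (l.count v) v) := by
        apply List.map_congr_left
        intro v hv
        have hne : v ≠ x := fun h => hxas (h ▸ hv)
        have hne' : ¬ (x = v) := fun h => hne h.symm
        simp [List.count_append, hne']
      have hbs : bs.map (fun v => List.replicate ((l ++ [x]).count v) v) = bs.map (fun v => List.replicate (l.count v) v) := by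
        apply List.map_congr_left
        intro v hv
        have hne : v ≠ x := fun h => hxbs (h ▸ hv)
        have hne' : ¬ (x = v) := fun h => hne h.symm
        simp [List.count_append, hne']
      rw [has, hbs, ← hFas, ← hFbs]
      have hcx : (l ++ [x]).count x = c + 1 := by
        simp [List.count_append, hc]
      rw [hcx]
      have hrep2 : List.replicate (c + 1) x = x :: x :: List.replicate (c - 1) x := by
        conv_lhs => rw [show c + 1 = ((c - 1) + 1) + 1 from by omega]
        rw [List.replicate_succ, List.replicate_succ]
      rw [hrep2]
      simp
    · -- append branch
      rw [aClusterStep, if_neg (by rw [mem_flatten_groups]; exact hx)]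
      have hof : PySem.Set.ofList (l ++ [x]) = PySem.Set.ofList l ++ [x] := by
        rw [PySem.Set.ofList_eq_foldl, List.foldl_append, List.foldl_cons, List.foldl_nil,
          ← PySem.Set.ofList_eq_foldl]
        exact PySem.Set.add_of_not_mem (by rw [PySem.Set.mem_ofList]; exact hx)
      conv_rhs => rw [pvGroups, hof]
      rw [List.map_append, List.flatten_append]
      congr 1
      · rw [pvGroups]
        congr 1
        apply List.map_congr_left
        intro v hv
        have hne : v ≠ x := fun h => hx (h ▸ ((PySem.Set.mem_ofList _ _).mp hv))
        simp [List.count_append, List.count_singleton]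
        exact fun h => hne h.symm
      · simp [List.count_append, List.count_eq_zero_of_not_mem hx]

theorem rle_absorb (k : Nat) : ∀ (v : Int) (cnt : Int) (acc : List (List Int)) (rest : List (Option Int)),
    (List.replicate k (some v) ++ rest).foldl aRLEStep (some v, cnt, acc)
    = rest.foldl aRLEStep (some v, cnt + k, acc) := by
  induction k with
  | zero => intro v cnt acc rest; simp
  | succ k ih =>
    intro v cnt acc rest
    rw [List.replicate_succ, List.cons_append, List.foldl_cons]
    have hstep : aRLEStep (some v, cnt, acc) (some v) = (some v, cnt + 1, acc) := by
      simp [aRLEStep]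
    have hc : cnt + 1 + (k : Int) = cnt + ((k + 1 : Nat) : Int) := by push_cast; ring
    rw [hstep, ih, hc]

theorem rle_main : ∀ (gps : List (Int × Nat)) (v : Int) (n : Nat) (acc : List (List Int)),
    v ∉ gps.map Prod.fst → (gps.map Prod.fst).Nodup → (∀ p ∈ gps, 1 ≤ p.2) →
    ((gps.flatMap (fun (p : Int × Nat) => List.replicate p.2 (some p.1)) ++ [none]).foldl aRLEStep (some v, (n : Int), acc)).2.2
    = acc ++ [List.replicate n v] ++ gps.map (fun p => List.replicate p.2 p.1) := by
  intro gps
  induction gps with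
  | nil =>
    intro v n acc _ _ _
    simp [aRLEStep]
  | cons p gps ih =>
    intro v n acc hv hnd hcnt
    obtain ⟨w, m⟩ := p
    have hvw : ¬ (some v = (some w : Option Int)) := by
      simp only [List.map_cons] at hv
      intro h
      exact hv (by simp at h; simp [h])
    have hm : 1 ≤ m := hcnt (w, m) List.mem_cons_self
    rw [List.flatMap_cons]
    have hrep : List.replicate m (some w) = some w :: List.replicate (m - 1) (some w) := by
      conv_lhs => rw [show m = (m - 1) + 1 from by omega]
      rw [List.replicate_succ]
    rw [hrep]
    simp only [List.cons_append, List.append_assoc, List.foldl_cons]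
    have hstep : aRLEStep (some v, (n : Int), acc) (some w) =
        (some w, 1, acc ++ [List.replicate n v]) := by
      simp [aRLEStep, hvw]
    rw [hstep, rle_absorb (m - 1)]
    have hcast : (1 : Int) + ((m - 1 : Nat) : Int) = (m : Int) := by
      omega
    rw [List.map_cons] at hnd
    rw [hcast, ih w m (acc ++ [List.replicate n v])
      (List.nodup_cons.mp hnd).1
      (List.nodup_cons.mp hnd).2
      (fun q hq => hcnt q (List.mem_cons_of_mem _ hq))]
    simp

theorem a_eq_groups (l : List Int) : advanced_sort l = pvGroups l := by
  show ((((l.foldl aClusterStep []).map some ++ [(none : Option Int)]).foldl aRLEStep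
      (PySem.List.pyGetD ((l.foldl aClusterStep []).map some ++ [(none : Option Int)]) 0 none, 0, [])).2.2)
      = pvGroups l
  rw [cluster_fold]
  rcases hl : PySem.Set.ofList l with _ | ⟨v₀, vs⟩
  · have hnil : l = [] := by
      cases l with
      | nil => rfl
      | cons a t =>
        exfalso
        have : a ∈ PySem.Set.ofList (a :: t) := (PySem.Set.mem_ofList _ _).mpr List.mem_cons_self
        rw [hl] at this
        exact (List.not_mem_nil) this
    subst hnil
    decide
  · have hndof : (v₀ :: vs).Nodup := hl ▸ PySem.Set.nodup_ofList l
    have hc0 : 1 ≤ l.count v₀ := by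
      refine (List.count_pos_iff).mpr ?_
      exact (PySem.Set.mem_ofList _ _).mp (hl ▸ List.mem_cons_self)
    set gps : List (Int × Nat) := vs.map (fun v => (v, l.count v)) with hgps
    have hX : ((pvGroups l).flatten.map some ++ [(none : Option Int)])
        = List.replicate (l.count v₀) (some v₀)
          ++ (gps.flatMap (fun (p : Int × Nat) => List.replicate p.2 (some p.1)) ++ [none]) := by
      rw [pvGroups, hl]
      simp [List.map_flatten, List.map_map, List.flatMap, hgps]
      congr 1
      apply List.map_congr_left
      intro v _
      simp [List.map_replicate]
    rw [hX]
    have hrep : List.replicate (l.count v₀) (some v₀)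
        = some v₀ :: List.replicate (l.count v₀ - 1) (some v₀) := by
      conv_lhs => rw [show l.count v₀ = (l.count v₀ - 1) + 1 from by omega]
      rw [List.replicate_succ]
    rw [hrep, List.cons_append, PySem.List.pyGetD_zero_cons, ← List.cons_append, ← hrep]
    rw [rle_absorb (l.count v₀) v₀ 0 [], zero_add]
    rw [rle_main gps v₀ (l.count v₀) []
      (by have hmap : gps.map Prod.fst = vs := by
            simp [hgps, List.map_map, Function.comp_def]
          rw [hmap]; exact (List.nodup_cons.mp hndof).1)
      (by have hmap : gps.map Prod.fst = vs := by
            simp [hgps, List.map_map, Function.comp_def]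
          rw [hmap]; exact (List.nodup_cons.mp hndof).2)
      (by rintro ⟨w, m⟩ hq
          simp only [hgps, List.mem_map] at hq
          obtain ⟨v, hv, heq⟩ := hq
          cases heq
          refine (List.count_pos_iff).mpr ?_
          exact (PySem.Set.mem_ofList _ _).mp (hl ▸ List.mem_cons_of_mem _ hv))]
    rw [pvGroups, hl, List.map_cons]
    simp [hgps, List.map_map, Function.comp]

theorem alt_eq_groups (l : List Int) : advanced_sort_alt l = pvGroups l := by
  show ((l.foldl (fun d item => d.insert item (d.getD item 0 + 1)) (PySem.Dict.empty (κ := Int) (ν := Int))).items.map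
      (fun p => PySem.List.pyRepeat [p.1] p.2)) = pvGroups l
  have hnd : ((l.foldl (fun d item => d.insert item (d.getD item 0 + 1)) (PySem.Dict.empty (κ := Int) (ν := Int))).keys).Nodup :=
    PySem.Dict.nodup_keys_foldl_insert l _ _ (by simp [PySem.Dict.empty, PySem.Dict.keys])
  rw [PySem.Dict.items_eq_map_keys _ hnd 0, PySem.Dict.keys_foldl_insert, pvGroups]
  simp [PySem.Dict.getD_foldl_insert_add_one, PySem.List.pyRepeat_singleton, PySem.Set.update,
    PySem.Dict.empty, PySem.Dict.keys, PySem.Set.ofList_eq_foldl]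
  intro a _
  simp [PySem.Dict.getD, PySem.Dict.get?]

-- ===== VERDICT (by name: the statement is the Claim_ definition above) =====
theorem advanced_sort_spec : Claim_equal_advanced_sort := by
  intro sequence _
  unfold Spec_advanced_sort
  rw [a_eq_groups, alt_eq_groups]
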